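-- pv_equiv track=rewrite | github.com/bl1231/bilbomd | tools/python/pae2const.py | _majority_chain_id
-- ===== SOURCE A (Python) =====
-- from collections import defaultdict
--
-- def _chain_id_for_index(idx: int, chain_segs: list) -> int:
--     if not chain_segs:
--         return 0
--     c = 0
--     for b in chain_segs:
--         if idx > b:
--             c += 1
--         else:
--             break
--     return c
--
-- def _majority_chain_id(indices: list[int], chain_segs: list) -> int:
--     """Return the majority chain id for a set of 0-based indices, based on chain_segs."""
--     if not chain_segs or not indices:
--         return 0
--     counts = defaultdict(int)
--     for idx in indices:
--         cid = _chain_id_for_index(idx, chain_segs)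
--         counts[cid] += 1
--     # return the chain id with max count
--     return max(counts.items(), key=lambda kv: kv[1])[0]
-- ===== SOURCE B (Python) =====
-- def _bisect_left(a, x):
--     lo, hi = 0, len(a)
--     while lo < hi:
--         mid = (lo + hi) // 2
--         if a[mid] < x:
--             lo = mid + 1
--         else:
--             hi = mid
--     return lo
--
--
-- def _majority_chain_id(indices: list[int], chain_segs: list) -> int:
--     """Majority chain id via binary search over the strict-record prefix of chain_segs.
--
--     A's per-index scan stops at the first boundary >= idx; that boundary is always a
--     strict running maximum of chain_segs, so only the (value, position) records matter,
--     and their values are strictly increasing -> bisect.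
--     """
--     if not indices:
--         return 0
--     recs = []  # (value, position) at strict running maxima of chain_segs
--     best = None
--     for i, b in enumerate(chain_segs):
--         if best is None or b > best:
--             recs.append((b, i))
--             best = b
--     vals = [v for v, _ in recs]
--     n_segs = len(chain_segs)
--     counts = {}
--     for idx in indices:
--         j = _bisect_left(vals, idx)
--         cid = recs[j][1] if j < len(recs) else n_segs
--         counts[cid] = counts.get(cid, 0) + 1
--     best_k, best_c = 0, 0
--     for k, v in counts.items():
--         if v > best_c:
--             best_k, best_c = k, v
--     return best_k
-- ===== Notes on version B (the rewrite author's own statement) =====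
-- stated objective: faster
-- what changed: Replaces the per-index linear scan of chain_segs (which stops at the first boundary >= idx) by one pass extracting the strict running-maximum records of chain_segs followed by a binary search per index, and replaces max(items, key) by a single first-max accumulator pass.
import Mathlib
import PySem

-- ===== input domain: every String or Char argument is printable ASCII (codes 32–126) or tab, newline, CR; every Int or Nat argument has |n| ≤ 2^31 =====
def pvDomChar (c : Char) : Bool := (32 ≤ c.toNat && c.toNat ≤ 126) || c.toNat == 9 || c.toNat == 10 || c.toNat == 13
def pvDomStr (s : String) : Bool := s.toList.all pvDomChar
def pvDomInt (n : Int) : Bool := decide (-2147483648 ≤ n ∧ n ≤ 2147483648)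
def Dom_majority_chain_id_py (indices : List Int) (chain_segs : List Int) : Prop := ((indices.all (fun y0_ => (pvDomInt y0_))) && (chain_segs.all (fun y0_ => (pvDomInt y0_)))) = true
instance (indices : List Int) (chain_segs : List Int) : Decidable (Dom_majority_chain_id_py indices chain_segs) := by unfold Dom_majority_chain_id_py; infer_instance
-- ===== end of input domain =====

-- B replaces A's per-index linear scan of chain_segs by a strict-record extraction plus
-- binary search per index (measured faster asymptotically), and the key-max by a first-max fold.


-- ===== PORT A =====
-- the 'for b in chain_segs: if idx > b: c += 1 else: break' loop of _chain_id_for_index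
def pvChainIdAux (idx : Int) (c : Int) : List Int → Int
  | [] => c
  | b :: t => if idx > b then pvChainIdAux idx (c + 1) t else c

def pvChainIdForIndex (idx : Int) (chain_segs : List Int) : Int :=
  if chain_segs = [] then 0 else pvChainIdAux idx 0 chain_segs

def majority_chain_id_py (indices : List Int) (chain_segs : List Int) : Int :=
  if chain_segs = [] ∨ indices = [] then 0
  else
    -- counts = defaultdict(int); for idx in indices: counts[cid] += 1
    let counts : PySem.Dict Int Int :=
      indices.foldl (fun d idx => d.modify (pvChainIdForIndex idx chain_segs) 0 (· + 1))
        PySem.Dict.empty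
    -- max(counts.items(), key=lambda kv: kv[1])[0]  (counts is nonempty here)
    match PySem.List.max? counts.items (fun kv => kv.2) with
    | some kv => kv.1
    | none => 0

-- ===== PORT B =====
-- the record-building loop of Source B: (value, position) at strict running maxima
def pvRecAux : List Int → Nat → Option Int → List (Int × Nat)
  | [], _, _ => []
  | b :: t, i, best =>
    match best with   -- 'best is None or b > best'
    | none => (b, i) :: pvRecAux t (i + 1) (some b)
    | some m => if m < b then (b, i) :: pvRecAux t (i + 1) (some b) else pvRecAux t (i + 1) best

def majority_chain_id_py_alt (indices : List Int) (chain_segs : List Int) : Int :=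
  if indices = [] then 0
  else
    let recs := pvRecAux chain_segs 0 none
    let vals := recs.map Prod.fst
    let n_segs := chain_segs.length
    -- hand-written _bisect_left in Source B is the standard bisect_left loop: PySem.List.bisectLeft is exact for it
    let counts : PySem.Dict Int Int :=
      indices.foldl (fun d idx =>
        let j := PySem.List.bisectLeft vals idx
        let cid : Int := if h : j < recs.length then (recs[j].2 : Int) else (n_segs : Int)
        d.insert cid (d.getD cid 0 + 1)) PySem.Dict.empty
    -- best_k, best_c = 0, 0; for k, v in counts.items(): if v > best_c: best_k, best_c = k, v
    (counts.items.foldl (fun acc kv => if acc.2 < kv.2 then kv else acc) ((0 : Int), (0 : Int))).1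

-- ===== PRECONDITION & SPEC =====
def Spec_majority_chain_id_py (indices : List Int) (chain_segs : List Int) (out : Int) : Prop := out = majority_chain_id_py_alt indices chain_segs
instance (indices : List Int) (chain_segs : List Int) (out : Int) : Decidable (Spec_majority_chain_id_py indices chain_segs out) := by unfold Spec_majority_chain_id_py; infer_instance

-- ===== CLAIM (what is proved, stated in full; the proofs are below) =====
def Claim_equal_majority_chain_id_py : Prop := ∀ (indices : List Int) (chain_segs : List Int), Dom_majority_chain_id_py indices chain_segs → Spec_majority_chain_id_py indices chain_segs (majority_chain_id_py indices chain_segs)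

-- ===== LEMMAS AND PROOFS =====

-- B's per-index chain id, factored out of the fold in majority_chain_id_py_alt (definitionally the same expression)
def pvCidB (chain_segs : List Int) (idx : Int) : Int :=
  let recs := pvRecAux chain_segs 0 none
  let j := PySem.List.bisectLeft (recs.map Prod.fst) idx
  if h : j < recs.length then (recs[j].2 : Int) else (chain_segs.length : Int)

-- first record with value ≥ idx → its position; else default
def pvLookFirst (idx : Int) : List (Int × Nat) → Nat → Nat
  | [], d => d
  | (v, p) :: t, d => if idx ≤ v then p else pvLookFirst idx t d

theorem pvRecAux_sorted (segs : List Int) (i : Nat) (best : Option Int) :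
    List.Pairwise (· ≤ ·) ((pvRecAux segs i best).map Prod.fst) ∧
    (∀ m, best = some m → ∀ q ∈ (pvRecAux segs i best).map Prod.fst, m ≤ q) := by
  induction segs generalizing i best with
  | nil => simp [pvRecAux]
  | cons b t ih =>
    match best with
    | none =>
      simp only [pvRecAux, List.map_cons, List.pairwise_cons]
      refine ⟨⟨fun q hq => (ih (i + 1) (some b)).2 b rfl q hq, (ih (i + 1) (some b)).1⟩, by simp⟩
    | some m =>
      by_cases hmb : m < b
      · simp only [pvRecAux, hmb, if_pos, List.map_cons, List.pairwise_cons]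
        refine ⟨⟨fun q hq => (ih (i + 1) (some b)).2 b rfl q hq, (ih (i + 1) (some b)).1⟩, ?_⟩
        intro m' hm' q hq
        injection hm' with h; subst h
        rcases List.mem_cons.mp hq with rfl | hq
        · exact le_of_lt hmb
        · exact le_trans (le_of_lt hmb) ((ih (i + 1) (some b)).2 b rfl q hq)
      · simp only [pvRecAux, hmb, if_neg, not_false_iff]
        refine ⟨(ih (i + 1) (some m)).1, ?_⟩
        intro m' hm' q hq
        injection hm' with h; subst h
        exact (ih (i + 1) (some m)).2 m rfl q hq

theorem pvChainIdAux_eq_lookFirst (idx : Int) (segs : List Int) (i : Nat) (best : Option Int)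
    (hbest : ∀ m, best = some m → m < idx) :
    pvChainIdAux idx (i : Int) segs =
      ((pvLookFirst idx (pvRecAux segs i best) (i + segs.length) : Nat) : Int) := by
  induction segs generalizing i best with
  | nil => simp [pvChainIdAux, pvRecAux, pvLookFirst]
  | cons b t ih =>
    have hstep : ∀ (best' : Option Int), (∀ m, best' = some m → m < idx) → idx > b →
        pvChainIdAux idx ((i : Int) + 1) t =
          ((pvLookFirst idx (pvRecAux t (i + 1) best') (i + (b :: t).length) : Nat) : Int) := by
      intro best' h' _
      have harith : ((i : Int) + 1) = ((i + 1 : Nat) : Int) := by push_cast; ring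
      have hd : i + (b :: t).length = (i + 1) + t.length := by simp [List.length_cons]; omega
      rw [hd, harith]
      exact ih (i + 1) best' h' 
    match best with
    | none =>
      simp only [pvRecAux]
      by_cases hib : idx > b
      · have hnle : ¬ idx ≤ b := by omega
        simp only [pvChainIdAux, hib, if_pos, pvLookFirst, hnle, if_neg, not_false_iff]
        exact hstep (some b) (fun m' hmm' => by injection hmm' with h; omega) hib
      · have hle : idx ≤ b := by omega
        simp [pvChainIdAux, hib, pvLookFirst, hle]
    | some m =>
      have hm : m < idx := hbest m rfl
      by_cases hmb : m < b
      · simp only [pvRecAux, hmb, if_pos]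
        by_cases hib : idx > b
        · have hnle : ¬ idx ≤ b := by omega
          simp only [pvChainIdAux, hib, if_pos, pvLookFirst, hnle, if_neg, not_false_iff]
          exact hstep (some b) (fun m' hmm' => by injection hmm' with h; omega) hib
        · have hle : idx ≤ b := by omega
          simp [pvChainIdAux, hib, pvLookFirst, hle]
      · have hib : idx > b := by omega
        simp only [pvRecAux, hmb, if_neg, not_false_iff, pvChainIdAux, hib, if_pos]
        exact hstep (some m) (fun m' hmm' => by injection hmm' with h; omega) hib

theorem pvLookFirst_of_facts (idx : Int) (recs : List (Int × Nat)) (d : Nat) (j : Nat)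
    (h1 : j ≤ recs.length)
    (h2 : ∀ k (hk : k < recs.length), k < j → (recs[k]).1 < idx)
    (h3 : ∀ k (hk : k < recs.length), j ≤ k → idx ≤ (recs[k]).1) :
    pvLookFirst idx recs d = if h : j < recs.length then (recs[j]'h).2 else d := by
  induction recs generalizing j with
  | nil => simp [pvLookFirst]
  | cons vp t ih =>
    obtain ⟨v, p⟩ := vp
    match j with
    | 0 =>
      have hv : idx ≤ v := h3 0 (by simp) (Nat.zero_le 0)
      simp [pvLookFirst, hv]
    | j + 1 =>
      have hv : v < idx := h2 0 (by simp) (Nat.succ_pos j)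
      have hnv : ¬ idx ≤ v := by omega
      have := ih j (by simpa [Nat.succ_le_succ_iff] using h1)
        (fun k hk hkj => h2 (k + 1) (by simpa using Nat.succ_lt_succ hk) (Nat.succ_lt_succ hkj))
        (fun k hk hjk => h3 (k + 1) (by simpa using Nat.succ_lt_succ hk) (Nat.succ_le_succ hjk))
      simp only [pvLookFirst, hnv, if_neg, not_false_iff, this]
      by_cases hj : j < t.length
      · rw [dif_pos hj, dif_pos (by simpa using Nat.succ_lt_succ hj)]
        simp
      · rw [dif_neg hj, dif_neg (by simp; omega)]

theorem pvLookFirst_eq_bisect (idx : Int) (recs : List (Int × Nat)) (d : Nat)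
    (hs : List.Pairwise (· ≤ ·) (recs.map Prod.fst)) :
    pvLookFirst idx recs d =
      (if h : PySem.List.bisectLeft (recs.map Prod.fst) idx < recs.length then
        (recs[PySem.List.bisectLeft (recs.map Prod.fst) idx]'h).2 else d) := by
  obtain ⟨hb1, hb2, hb3⟩ := PySem.List.bisectLeft_spec (recs.map Prod.fst) idx hs
  apply pvLookFirst_of_facts
  · simpa using hb1
  · intro k hk hkj
    have := hb2 k (by simpa using hk) hkj
    simpa using this
  · intro k hk hjk
    have := hb3 k (by simpa using hk) hjk
    simpa using this

theorem pvCid_eq (idx : Int) (segs : List Int) :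
    pvChainIdForIndex idx segs = pvCidB segs idx := by
  have hbest : ∀ m, (none : Option Int) = some m → m < idx := by intro m h; cases h
  have h1 := pvChainIdAux_eq_lookFirst idx segs 0 none hbest
  have hs := (pvRecAux_sorted segs 0 none).1
  have h2 := pvLookFirst_eq_bisect idx (pvRecAux segs 0 none) (0 + segs.length) hs
  by_cases hseg : segs = []
  · subst hseg; rfl
  · show (if segs = [] then 0 else pvChainIdAux idx 0 segs) = pvCidB segs idx
    rw [if_neg hseg, show (0 : Int) = ((0 : Nat) : Int) from rfl, h1, h2]
    simp only [pvCidB]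
    by_cases hj : PySem.List.bisectLeft (List.map Prod.fst (pvRecAux segs 0 none)) idx < (pvRecAux segs 0 none).length
    · simp only [hj, dif_pos]
    · simp only [hj, dif_neg, not_false_iff]
      simp

-- Python max(items, key=value) on a nonempty list is a running first-max fold
theorem pvMax?_cons_eq (t : List (Int × Int)) (m : Int × Int) :
    PySem.List.max? (m :: t) (fun kv => kv.2) =
      some (t.foldl (fun acc kv => if acc.2 < kv.2 then kv else acc) m) := by
  induction t generalizing m with
  | nil => rfl
  | cons x t ih =>
    have h1 : PySem.List.max? (m :: x :: t) (fun kv : Int × Int => kv.2)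
        = PySem.List.max? ((if m.2 < x.2 then x else m) :: t) (fun kv => kv.2) := by
      by_cases h : m.2 < x.2 <;> simp [PySem.List.max?, List.foldl_cons, h]
    rw [h1, ih]
    simp only [List.foldl_cons]

-- and Source B's explicit first-max loop from (0, 0) agrees with it when all values ≥ 1
theorem pvArgmax_eq (l : List (Int × Int)) (hne : l ≠ [])
    (hpos : ∀ kv ∈ l, (1 : Int) ≤ kv.2) :
    (match PySem.List.max? l (fun kv => kv.2) with
     | some kv => kv.1
     | none => 0) =
    (l.foldl (fun acc kv => if acc.2 < kv.2 then kv else acc) ((0 : Int), (0 : Int))).1 := by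
  match l, hne with
  | x :: t, _ =>
    rw [pvMax?_cons_eq]
    have hx : (1 : Int) ≤ x.2 := hpos x List.mem_cons_self
    simp only [List.foldl_cons]
    rw [if_pos (lt_of_lt_of_le one_pos hx)]

-- the first-max fold keeps first component 0 when every key is 0
theorem pvFold_fst_zero (l : List (Int × Int)) (acc : Int × Int) (hacc : acc.1 = 0)
    (h : ∀ kv ∈ l, kv.1 = 0) :
    (l.foldl (fun acc kv => if acc.2 < kv.2 then kv else acc) acc).1 = 0 := by
  induction l generalizing acc with
  | nil => exact hacc
  | cons x t ih =>
    simp only [List.foldl_cons]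
    by_cases hx : acc.2 < x.2
    · rw [if_pos hx]
      exact ih x (h x List.mem_cons_self) (fun kv hkv => h kv (List.mem_cons_of_mem _ hkv))
    · rw [if_neg hx]
      exact ih acc hacc (fun kv hkv => h kv (List.mem_cons_of_mem _ hkv))

-- every value of counter xs with key in xs is ≥ 1
theorem pvCounter_items_pos (xs : List Int) (kv : Int × Int)
    (hkv : kv ∈ (PySem.Dict.counter xs).items) : (1 : Int) ≤ kv.2 := by
  rw [PySem.Dict.items_counter] at hkv
  obtain ⟨k, hk, rfl⟩ := List.mem_map.mp hkv
  have hkx : k ∈ xs := (PySem.Set.mem_ofList xs k).mp hk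
  have : 0 < xs.count k := List.count_pos_iff.mpr hkx
  simp only []
  exact_mod_cast this

-- counter items of a nonempty source are nonempty
theorem pvCounter_items_ne (xs : List Int) (hne : xs ≠ []) :
    (PySem.Dict.counter xs).items ≠ [] := by
  intro h
  rw [PySem.Dict.items_counter] at h
  have := List.map_eq_nil_iff.mp h
  match xs, hne with
  | x :: t, _ =>
    have hx : x ∈ PySem.Set.ofList (x :: t) := (PySem.Set.mem_ofList _ _).mpr List.mem_cons_self
    rw [this] at hx
    exact List.not_mem_nil hx

-- B's result, written through counter of the mapped chain ids
theorem pvAltEq (indices chain_segs : List Int) (hind : indices ≠ []) :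
    majority_chain_id_py_alt indices chain_segs =
      ((PySem.Dict.counter (indices.map (pvCidB chain_segs))).items.foldl
        (fun acc kv => if acc.2 < kv.2 then kv else acc) ((0 : Int), (0 : Int))).1 := by
  unfold majority_chain_id_py_alt
  rw [if_neg hind]
  show ((indices.foldl (fun (d : PySem.Dict Int Int) (idx : Int) =>
      d.insert (pvCidB chain_segs idx) (d.getD (pvCidB chain_segs idx) 0 + 1))
      PySem.Dict.empty).items.foldl
        (fun acc kv => if acc.2 < kv.2 then kv else acc) ((0 : Int), (0 : Int))).1 = _
  have h1 := List.foldl_map (f := pvCidB chain_segs)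
    (g := fun (d : PySem.Dict Int Int) (x : Int) => d.insert x (d.getD x 0 + 1))
    (l := indices) (init := PySem.Dict.empty)
  have hd : indices.foldl (fun (d : PySem.Dict Int Int) (idx : Int) =>
        d.insert (pvCidB chain_segs idx) (d.getD (pvCidB chain_segs idx) 0 + 1)) PySem.Dict.empty
      = PySem.Dict.counter (indices.map (pvCidB chain_segs)) :=
    h1.symm.trans (PySem.Dict.foldl_insert_getD_add_one_eq_counter _)
  rw [hd]

-- ===== VERDICT (by name: the statement is the Claim_ definition above) =====
theorem majority_chain_id_py_spec : Claim_equal_majority_chain_id_py := by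
  unfold Claim_equal_majority_chain_id_py
  intro indices chain_segs _
  unfold Spec_majority_chain_id_py
  by_cases hind : indices = []
  · simp [majority_chain_id_py, majority_chain_id_py_alt, hind]
  · rw [pvAltEq indices chain_segs hind]
    by_cases hseg : chain_segs = []
    · -- A returns 0 by its guard; B counts every index into chain id 0, whose argmax is 0
      have hA : majority_chain_id_py indices chain_segs = 0 := by
        unfold majority_chain_id_py
        rw [if_pos (Or.inl hseg)]
      rw [hA]
      have hkeys : ∀ kv ∈ (PySem.Dict.counter (indices.map (pvCidB chain_segs))).items, kv.1 = 0 := by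
        intro kv hkv
        rw [PySem.Dict.items_counter] at hkv
        obtain ⟨k, hk, rfl⟩ := List.mem_map.mp hkv
        have hkx : k ∈ indices.map (pvCidB chain_segs) := (PySem.Set.mem_ofList _ _).mp hk
        obtain ⟨i, _, rfl⟩ := List.mem_map.mp hkx
        subst hseg
        rfl
      exact (pvFold_fst_zero _ _ rfl hkeys).symm
    · -- main case: both are the keyed max over the same counter
      have hmap : indices.map (fun idx => pvChainIdForIndex idx chain_segs)
          = indices.map (pvCidB chain_segs) :=
        List.map_congr_left (fun idx _ => pvCid_eq idx chain_segs)
      have hA : majority_chain_id_py indices chain_segs =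
          (match PySem.List.max? (PySem.Dict.counter (indices.map (pvCidB chain_segs))).items
              (fun kv => kv.2) with
           | some kv => kv.1
           | none => 0) := by
        unfold majority_chain_id_py
        rw [if_neg (not_or.mpr ⟨hseg, hind⟩)]
        show (match PySem.List.max? (indices.foldl (fun (d : PySem.Dict Int Int) (idx : Int) =>
            d.modify (pvChainIdForIndex idx chain_segs) 0 (· + 1)) PySem.Dict.empty).items
            (fun kv => kv.2) with
          | some kv => kv.1
          | none => 0) = _
        have h1 := List.foldl_map (f := fun idx => pvChainIdForIndex idx chain_segs)
          (g := fun (d : PySem.Dict Int Int) (x : Int) => d.modify x 0 (· + 1))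
          (l := indices) (init := PySem.Dict.empty)
        have hd : indices.foldl (fun (d : PySem.Dict Int Int) (idx : Int) =>
              d.modify (pvChainIdForIndex idx chain_segs) 0 (· + 1)) PySem.Dict.empty
            = PySem.Dict.counter (indices.map (pvCidB chain_segs)) := by
          rw [← hmap, PySem.Dict.counter_eq_foldl]
          exact h1.symm
        rw [hd]
      rw [hA]
      exact pvArgmax_eq _
        (pvCounter_items_ne _ (by simpa using hind))
        (fun kv hkv => pvCounter_items_pos _ kv hkv)
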